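-- pv_equiv track=rewrite | github.com/adrian-pace/additional_repos_pmi | project-pace-mourad/our development files unrelated to the submission/fayez/src/preprocessing.py | remove_specials_characters
-- ===== SOURCE A (Python) =====
-- def remove_specials_characters(documents):
--     """
--     Remove special characters
--     :param documents: the documents from where we remove the characters
--     :return: the documents without the special characters
--     """
--     documents_no_specials = []
--     for item in documents:
--         documents_no_specials.append(
--             item.replace('\r', ' ').replace('/n', ' ').replace('.', ' ').replace(',', ' ').replace('(', ' ') \
--             .replace(')', ' ').replace("'s", ' ').replace('"', ' ') \
--             .replace('!', ' ').replace('?', ' ').replace("'", '') \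
--             .replace('>', ' ').replace('$', ' ') \
--             .replace('-', ' ').replace(';', ' ') \
--             .replace(':', ' ').replace('/', ' ').replace('#', ' '))
--     return documents_no_specials
-- ===== SOURCE B (Python) =====
-- def _clean(item):
--     """One left-to-right scan: two-char patterns ("'s", "/n") -> space,
--     lone apostrophe deleted, other special chars -> space, rest kept."""
--     singles = set('\r.,()"!?>$-;:/#')
--     out = []
--     i = 0
--     n = len(item)
--     while i < n:
--         c = item[i]
--         if c == "'" and i + 1 < n and item[i + 1] == 's':
--             out.append(' ')
--             i += 2
--         elif c == '/' and i + 1 < n and item[i + 1] == 'n':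
--             out.append(' ')
--             i += 2
--         elif c == "'":
--             i += 1
--         elif c in singles:
--             out.append(' ')
--             i += 1
--         else:
--             out.append(c)
--             i += 1
--     return ''.join(out)
--
--
-- def remove_specials_characters(documents):
--     """
--     Remove special characters
--     :param documents: the documents from where we remove the characters
--     :return: the documents without the special characters
--     """
--     return [_clean(item) for item in documents]
-- ===== Notes on version B (the rewrite author's own statement) =====
-- stated objective: alternative
-- what changed: replaces A's 18 staged whole-string replace passes by a single left-to-right character scan with one-character lookahead (consume "'s" or "/n" as a pair, delete a lone apostrophe, map other specials to a space, keep the rest), building each output string in one pass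
import Mathlib
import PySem

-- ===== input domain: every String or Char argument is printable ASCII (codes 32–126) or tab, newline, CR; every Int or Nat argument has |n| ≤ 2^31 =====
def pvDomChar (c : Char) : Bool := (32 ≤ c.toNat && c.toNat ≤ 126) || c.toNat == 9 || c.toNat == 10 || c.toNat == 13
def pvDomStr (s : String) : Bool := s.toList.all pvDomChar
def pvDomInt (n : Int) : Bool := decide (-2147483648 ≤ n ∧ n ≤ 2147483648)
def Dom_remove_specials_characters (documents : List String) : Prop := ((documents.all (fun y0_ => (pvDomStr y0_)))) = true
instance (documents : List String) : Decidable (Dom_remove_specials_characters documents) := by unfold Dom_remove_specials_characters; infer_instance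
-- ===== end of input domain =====

-- B replaces A's 18 staged whole-string replace passes by a single left-to-right
-- character scan with one-character lookahead (objective: alternative).

-- ===== PORT A =====
-- literal transliteration of A: a loop appending, per item, the chain of 18 .replace calls
def remove_specials_characters (documents : List String) : List String :=
  documents.foldl
    (fun documents_no_specials item =>
      documents_no_specials ++
        [PySem.Str.replace (PySem.Str.replace (PySem.Str.replace (PySem.Str.replace
          (PySem.Str.replace (PySem.Str.replace (PySem.Str.replace (PySem.Str.replace
          (PySem.Str.replace (PySem.Str.replace (PySem.Str.replace (PySem.Str.replace
          (PySem.Str.replace (PySem.Str.replace (PySem.Str.replace (PySem.Str.replace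
          (PySem.Str.replace (PySem.Str.replace item "\r" " ") "/n" " ") "." " ") "," " ")
          "(" " ") ")" " ") "'s" " ") "\"" " ") "!" " ") "?" " ") "'" "") ">" " ") "$" " ")
          "-" " ") ";" " ") ":" " ") "/" " ") "#" " "]) []

-- ===== PORT B =====
-- Source B's `singles` set of single characters mapped to a space
def pvSingles : List Char := ['\r', '.', ',', '(', ')', '"', '!', '?', '>', '$', '-', ';', ':', '/', '#']

-- transcription of Source B's `_clean` while loop: the index-with-lookahead scan becomes
-- structural recursion on the character list, branches in the loop's order
def pvClean : List Char → List Char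
  | [] => []
  | c :: t =>
    if c = '\'' ∧ t.head? = some 's' then ' ' :: pvClean t.tail
    else if c = '/' ∧ t.head? = some 'n' then ' ' :: pvClean t.tail
    else if c = '\'' then pvClean t
    else if c ∈ pvSingles then ' ' :: pvClean t
    else c :: pvClean t
  termination_by l => l.length
  decreasing_by all_goals (simp [List.length_tail]; try omega)

-- transcription of Source B's list comprehension
def remove_specials_characters_alt (documents : List String) : List String :=
  documents.map (fun item => String.ofList (pvClean item.toList))

-- ===== PRECONDITION & SPEC =====
def Spec_remove_specials_characters (documents : List String) (out : List String) : Prop := out = remove_specials_characters_alt documents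
instance (documents : List String) (out : List String) : Decidable (Spec_remove_specials_characters documents out) := by unfold Spec_remove_specials_characters; infer_instance

-- ===== CLAIM (what is proved, stated in full; the proofs are below) =====
def Claim_equal_remove_specials_characters : Prop := ∀ (documents : List String), Dom_remove_specials_characters documents → Spec_remove_specials_characters documents (remove_specials_characters documents)

-- ===== LEMMAS AND PROOFS =====

-- the character table underlying both programs: apostrophe deleted, specials to space
def pvTranslate (c : Char) : Option Char :=
  if c = '\'' then none
  else if c ∈ pvSingles then some ' '
  else some c

-- single-character replace, as a flatMap (covers both substitution and deletion)
theorem go_single (c : Char) (new : List Char) (fuel : Nat) :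
    ∀ (l acc : List Char), l.length ≤ fuel →
      PySem.Chars.replace.go [c] new fuel l acc =
        acc.reverse ++ (l.flatMap (fun x => if x = c then new else [x])) := by
  induction fuel with
  | zero => intro l acc h
            rw [PySem.Chars.replace.go.eq_def]
            cases l with
            | nil => simp
            | cons a t => simp at h
  | succ n ih =>
      intro l acc h
      rw [PySem.Chars.replace.go.eq_def]
      cases l with
      | nil => simp
      | cons a t =>
          simp only [List.flatMap_cons]
          by_cases hac : a = c
          · subst hac
            have hp : [a].isPrefixOf (a :: t) = true := by simp [List.isPrefixOf]
            simp only [hp, if_true, List.length_cons, List.length_nil, Nat.zero_add,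
              List.drop_one, List.tail_cons]
            rw [ih t (new.reverse ++ acc) (by simpa using Nat.le_of_succ_le_succ h)]
            simp
          · have hp : [c].isPrefixOf (a :: t) = false := by simp [List.isPrefixOf, Ne.symm hac]
            rw [hp]
            simp only [Bool.false_eq_true, if_false]
            rw [ih t (a :: acc) (by simpa using Nat.le_of_succ_le_succ h)]
            simp [hac]

-- a two-character replace commutes with a character map that fixes the pattern,
-- the replacement character, and whose other outputs avoid the pattern
theorem go_two_map_comm (a b e : Char) (f : Char → Char)
    (hfa : f a = a) (hfb : f b = b) (hfe : f e = e)
    (hpa : ∀ x, f x = a → x = a) (hpb : ∀ x, f x = b → x = b) (fuel : Nat) :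
    ∀ (l acc : List Char), l.length ≤ fuel →
      PySem.Chars.replace.go [a, b] [e] fuel (l.map f) (acc.map f) =
        (PySem.Chars.replace.go [a, b] [e] fuel l acc).map f := by
  induction fuel with
  | zero => intro l acc h
            rw [PySem.Chars.replace.go.eq_def, PySem.Chars.replace.go.eq_def]
            cases l with
            | nil => simp
            | cons x t => simp at h
  | succ n ih =>
      intro l acc h
      rw [PySem.Chars.replace.go.eq_def, PySem.Chars.replace.go.eq_def]
      cases l with
      | nil => simp
      | cons x t =>
          simp only [List.map_cons]
          have hiff : ([a, b].isPrefixOf (f x :: t.map f)) = ([a, b].isPrefixOf (x :: t)) := by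
            cases t with
            | nil => simp [List.isPrefixOf]
            | cons y u =>
                simp only [List.map_cons, List.isPrefixOf]
                have h1 : (a == f x) = (a == x) := by
                  by_cases hx : x = a
                  · subst hx; simp [hfa]
                  · have : f x ≠ a := fun hc => hx (hpa x hc)
                    simp [Ne.symm this, Ne.symm hx]
                have h2 : (b == f y) = (b == y) := by
                  by_cases hy : y = b
                  · subst hy; simp [hfb]
                  · have : f y ≠ b := fun hc => hy (hpb y hc)
                    simp [Ne.symm this, Ne.symm hy]
                simp [h1, h2]
          rw [hiff]
          by_cases hp : [a, b].isPrefixOf (x :: t) = true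
          · rw [if_pos hp, if_pos hp]
            cases t with
            | nil => simp [List.isPrefixOf] at hp
            | cons y u =>
                simp only [List.isPrefixOf, Bool.and_true, Bool.and_eq_true, beq_iff_eq] at hp
                obtain ⟨hx, hy⟩ := hp
                have hx' : x = a := hx.symm
                have hy' : y = b := hy.symm
                subst hx'; subst hy'
                simp only [hfa, List.length_cons, List.length_nil, List.drop_succ_cons,
                  List.drop_zero, List.reverse_cons, List.reverse_nil, List.nil_append,
                  List.singleton_append]
                simpa [hfe] using ih u (e :: acc) (by simp at h; omega)
          · rw [if_neg hp, if_neg hp]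
            have := ih t (x :: acc) (by simp at h; omega)
            simpa using this

-- the character-map / delete views of the single-character replaces
def pvM (c : Char) (l : List Char) : List Char := l.map (fun x => if x = c then ' ' else x)
def pvD (l : List Char) : List Char := l.flatMap (fun x => if x = '\'' then [] else [x])

theorem replace_single_sp (c : Char) (s : List Char) :
    PySem.Chars.replace s [c] [' '] = pvM c s := by
  simp only [PySem.Chars.replace, List.isEmpty_cons, Bool.false_eq_true, if_false]
  rw [go_single c [' '] s.length s [] (le_refl _)]
  simp only [List.reverse_nil, List.nil_append, pvM]
  induction s with
  | nil => simp
  | cons a t ih => by_cases h : a = c <;> simp [List.flatMap_cons, h, ih]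

theorem replace_single_del (s : List Char) :
    PySem.Chars.replace s ['\''] [] = pvD s := by
  simp only [PySem.Chars.replace, List.isEmpty_cons, Bool.false_eq_true, if_false]
  rw [go_single '\'' [] s.length s [] (le_refl _)]
  simp [pvD]

theorem replace_two_comm (a b : Char) (c : Char)
    (ha : a ≠ c) (hb : b ≠ c) (hc : c ≠ ' ') (ha' : a ≠ ' ') (hb' : b ≠ ' ') (l : List Char) :
    PySem.Chars.replace (pvM c l) [a, b] [' '] = pvM c (PySem.Chars.replace l [a, b] [' ']) := by
  have hfa : (fun x => if x = c then ' ' else x) a = a := by simp [ha]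
  have hfb : (fun x => if x = c then ' ' else x) b = b := by simp [hb]
  have hfe : (fun x => if x = c then ' ' else x) ' ' = ' ' := by
    by_cases h : (' ' : Char) = c
    · exact absurd h.symm hc
    · simp [h]
  have hpa : ∀ x, (fun x => if x = c then ' ' else x) x = a → x = a := by
    intro x hx; by_cases h : x = c
    · simp [h] at hx; exact absurd hx ha'.symm
    · simpa [h] using hx
  have hpb : ∀ x, (fun x => if x = c then ' ' else x) x = b → x = b := by
    intro x hx; by_cases h : x = c
    · simp [h] at hx; exact absurd hx hb'.symm
    · simpa [h] using hx
  simp only [PySem.Chars.replace, List.isEmpty_cons, Bool.false_eq_true, if_false, pvM]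
  rw [show (l.map fun x => if x = c then ' ' else x).length = l.length by simp]
  have := go_two_map_comm a b ' ' (fun x => if x = c then ' ' else x)
    hfa hfb hfe hpa hpb l.length l [] (le_refl _)
  simpa using this

-- the composed single-character pass of A, in A's order
def pvChain (l : List Char) : List Char :=
  pvM '#' (pvM '/' (pvM ':' (pvM ';' (pvM '-' (pvM '$' (pvM '>' (pvD (pvM '?' (pvM '!'
    (pvM '"' (pvM ')' (pvM '(' (pvM ',' (pvM '.' (pvM '\r' l)))))))))))))))

theorem pvChain_append (l₁ l₂ : List Char) :
    pvChain (l₁ ++ l₂) = pvChain l₁ ++ pvChain l₂ := by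
  simp [pvChain, pvM, pvD, List.flatMap_append]

theorem pvChain_singleton (c : Char) : pvChain [c] = (pvTranslate c).toList := by
  by_cases h1 : c = '\r'; · subst h1; decide
  by_cases h2 : c = '.'; · subst h2; decide
  by_cases h3 : c = ','; · subst h3; decide
  by_cases h4 : c = '('; · subst h4; decide
  by_cases h5 : c = ')'; · subst h5; decide
  by_cases h6 : c = '"'; · subst h6; decide
  by_cases h7 : c = '!'; · subst h7; decide
  by_cases h8 : c = '?'; · subst h8; decide
  by_cases h9 : c = '\''; · subst h9; decide
  by_cases h10 : c = '>'; · subst h10; decide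
  by_cases h11 : c = '$'; · subst h11; decide
  by_cases h12 : c = '-'; · subst h12; decide
  by_cases h13 : c = ';'; · subst h13; decide
  by_cases h14 : c = ':'; · subst h14; decide
  by_cases h15 : c = '/'; · subst h15; decide
  by_cases h16 : c = '#'; · subst h16; decide
  simp [pvChain, pvM, pvD, pvTranslate, pvSingles, h1, h2, h3, h4, h5, h6, h7, h8, h9, h10,
    h11, h12, h13, h14, h15, h16]

theorem pvChain_eq_filterMap (l : List Char) : pvChain l = l.filterMap pvTranslate := by
  induction l with
  | nil => decide
  | cons c t ih =>
      have : (c :: t) = [c] ++ t := rfl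
      rw [this, pvChain_append, ih, pvChain_singleton]
      cases h : pvTranslate c <;> simp [h]

-- greedy non-overlapping replace of a two-character pattern by a space
def pvRep2 (p q : Char) : List Char → List Char
  | [] => []
  | [c] => [c]
  | c :: d :: t => if c = p ∧ d = q then ' ' :: pvRep2 p q t else c :: pvRep2 p q (d :: t)
  termination_by l => l.length

theorem rep2_cons_nomatch (p q c : Char) (l : List Char)
    (h : ¬ (c = p ∧ l.head? = some q)) : pvRep2 p q (c :: l) = c :: pvRep2 p q l := by
  cases l with
  | nil => simp [pvRep2]
  | cons d t =>
      have h' : ¬ (c = p ∧ d = q) := by simpa using h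
      simp [pvRep2, h']

theorem rep2_head (p q c : Char) (l : List Char) :
    (pvRep2 p q (c :: l)).head? = some c ∨ (pvRep2 p q (c :: l)).head? = some ' ' := by
  cases l with
  | nil => simp [pvRep2]
  | cons d t =>
      by_cases h : c = p ∧ d = q
      · right; simp [pvRep2, h]
      · left; simp [pvRep2, h]

theorem go_two (p q : Char) (fuel : Nat) :
    ∀ (l acc : List Char), l.length ≤ fuel →
      PySem.Chars.replace.go [p, q] [' '] fuel l acc = acc.reverse ++ pvRep2 p q l := by
  induction fuel with
  | zero => intro l acc h
            rw [PySem.Chars.replace.go.eq_def]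
            cases l with
            | nil => simp [pvRep2]
            | cons a t => simp at h
  | succ n ih =>
      intro l acc h
      rw [PySem.Chars.replace.go.eq_def]
      cases l with
      | nil => simp [pvRep2]
      | cons c t =>
          cases t with
          | nil =>
              have hp : [p, q].isPrefixOf [c] = false := by simp [List.isPrefixOf]
              simp only [hp, Bool.false_eq_true, if_false]
              rw [ih [] (c :: acc) (by simp)]
              simp [pvRep2]
          | cons d u =>
              by_cases hpq : c = p ∧ d = q
              · obtain ⟨hc, hd⟩ := hpq
                subst hc; subst hd
                have hp : [c, d].isPrefixOf (c :: d :: u) = true := by simp [List.isPrefixOf]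
                simp only [hp, if_true, List.length_cons, List.length_nil, List.drop_succ_cons,
                  List.drop_zero]
                rw [ih u ([' '].reverse ++ acc) (by simp at h; omega)]
                simp [pvRep2]
              · have hp : [p, q].isPrefixOf (c :: d :: u) = false := by
                  rcases not_and_or.mp hpq with h1 | h2
                  · simp [List.isPrefixOf, Ne.symm h1]
                  · simp [List.isPrefixOf, Ne.symm h2]
                simp only [hp, Bool.false_eq_true, if_false]
                rw [ih (d :: u) (c :: acc) (by simp at h ⊢; omega)]
                have := rep2_cons_nomatch p q c (d :: u) (by simpa using hpq)
                rw [this]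
                simp
    
theorem replace_two (p q : Char) (l : List Char) :
    PySem.Chars.replace l [p, q] [' '] = pvRep2 p q l := by
  simp only [PySem.Chars.replace, List.isEmpty_cons, Bool.false_eq_true, if_false]
  rw [go_two p q l.length l [] (le_refl _)]
  simp

theorem clean_single (c : Char) : pvClean [c] = (pvTranslate c).toList := by
  by_cases h1 : c = '\''
  · subst h1; simp [pvClean, pvTranslate]
  · by_cases h2 : c ∈ pvSingles <;> simp [pvClean, pvTranslate, h1, h2]

-- THE FUSION LEMMA: B's single scan equals "/n"-replace, then "'s"-replace, then the table
theorem fusion (n : Nat) : ∀ (l : List Char), l.length ≤ n →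
    pvClean l = (pvRep2 '\'' 's' (pvRep2 '/' 'n' l)).filterMap pvTranslate := by
  induction n with
  | zero => intro l h
            have : l = [] := List.eq_nil_of_length_eq_zero (Nat.le_zero.mp h)
            subst this; simp [pvClean, pvRep2]
  | succ n ih =>
      intro l h
      cases l with
      | nil => simp [pvClean, pvRep2]
      | cons c t =>
          cases t with
          | nil =>
              have r1 : pvRep2 '/' 'n' [c] = [c] := by simp [pvRep2]
              have r2 : pvRep2 '\'' 's' [c] = [c] := by simp [pvRep2]
              rw [r1, r2, clean_single c]
              cases hc : pvTranslate c <;> simp [hc]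
          | cons d t' =>
              have hlen : t'.length ≤ n := by simp at h; omega
              have hlen2 : (d :: t').length ≤ n := by simp at h ⊢; omega
              by_cases h1 : c = '\'' ∧ d = 's'
              · obtain ⟨hc, hd⟩ := h1; subst hc; subst hd
                rw [rep2_cons_nomatch '/' 'n' '\'' _ (by simp),
                    rep2_cons_nomatch '/' 'n' 's' _ (by simp)]
                rw [show pvRep2 '\'' 's' ('\'' :: 's' :: pvRep2 '/' 'n' t') =
                      ' ' :: pvRep2 '\'' 's' (pvRep2 '/' 'n' t') by simp [pvRep2]]
                rw [show pvClean ('\'' :: 's' :: t') = ' ' :: pvClean t' by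
                      simp [pvClean]]
                rw [ih t' hlen]
                simp [pvTranslate, pvSingles]
              · by_cases h2 : c = '/' ∧ d = 'n'
                · obtain ⟨hc, hd⟩ := h2; subst hc; subst hd
                  rw [show pvRep2 '/' 'n' ('/' :: 'n' :: t') = ' ' :: pvRep2 '/' 'n' t' by
                        simp [pvRep2]]
                  rw [rep2_cons_nomatch '\'' 's' ' ' _ (by simp)]
                  rw [show pvClean ('/' :: 'n' :: t') = ' ' :: pvClean t' by
                        simp [pvClean]]
                  rw [ih t' hlen]
                  simp [pvTranslate, pvSingles]
                · -- no two-character pattern starts at c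
                  rw [rep2_cons_nomatch '/' 'n' c (d :: t') (by simpa using h2)]
                  have hX : ¬ (c = '\'' ∧ (pvRep2 '/' 'n' (d :: t')).head? = some 's') := by
                    rintro ⟨hc, hhd⟩
                    rcases rep2_head '/' 'n' d t' with hh | hh
                    · rw [hh] at hhd
                      exact h1 ⟨hc, by simpa using hhd⟩
                    · rw [hh] at hhd
                      simp at hhd
                  rw [rep2_cons_nomatch '\'' 's' c _ hX]
                  have hcl : pvClean (c :: d :: t') = (pvTranslate c).toList ++ pvClean (d :: t') := by
                    by_cases hc : c = '\''
                    · have hd : ¬ d = 's' := fun hh => h1 ⟨hc, hh⟩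
                      simp [pvClean, pvTranslate, hc, hd]
                    · by_cases hm : c ∈ pvSingles <;>
                        simp [pvClean, pvTranslate, hc, hm, h2]
                  rw [hcl, ih (d :: t') hlen2]
                  cases hc : pvTranslate c <;> simp [hc]

-- the per-item equality: A's chain of replaces equals B's single scan
theorem item_eq (item : String) :
    PySem.Str.replace (PySem.Str.replace (PySem.Str.replace (PySem.Str.replace
      (PySem.Str.replace (PySem.Str.replace (PySem.Str.replace (PySem.Str.replace
      (PySem.Str.replace (PySem.Str.replace (PySem.Str.replace (PySem.Str.replace
      (PySem.Str.replace (PySem.Str.replace (PySem.Str.replace (PySem.Str.replace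
      (PySem.Str.replace (PySem.Str.replace item "\r" " ") "/n" " ") "." " ") "," " ")
      "(" " ") ")" " ") "'s" " ") "\"" " ") "!" " ") "?" " ") "'" "") ">" " ") "$" " ")
      "-" " ") ";" " ") ":" " ") "/" " ") "#" " " =
    String.ofList (pvClean item.toList) := by
  -- move everything to the character level
  simp only [PySem.Str.replace, String.toList_ofList]
  refine congrArg String.ofList ?_
  set t := item.toList with ht
  -- rewrite the 16 single-character replaces as maps / a filter
  rw [show ("\r" : String).toList = ['\r'] from rfl, show ("/n" : String).toList = ['/', 'n'] from rfl,
      show ("." : String).toList = ['.'] from rfl, show ("," : String).toList = [','] from rfl,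
      show ("(" : String).toList = ['('] from rfl, show (")" : String).toList = [')'] from rfl,
      show ("'s" : String).toList = ['\'', 's'] from rfl, show ("\"" : String).toList = ['"'] from rfl,
      show ("!" : String).toList = ['!'] from rfl, show ("?" : String).toList = ['?'] from rfl,
      show ("'" : String).toList = ['\''] from rfl, show ("" : String).toList = [] from rfl,
      show (">" : String).toList = ['>'] from rfl, show ("$" : String).toList = ['$'] from rfl,
      show ("-" : String).toList = ['-'] from rfl, show (";" : String).toList = [';'] from rfl,
      show (":" : String).toList = [':'] from rfl, show ("/" : String).toList = ['/'] from rfl,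
      show ("#" : String).toList = ['#'] from rfl, show (" " : String).toList = [' '] from rfl]
  rw [replace_single_sp '\r', replace_single_sp '.', replace_single_sp ',',
      replace_single_sp '(', replace_single_sp ')', replace_single_sp '"',
      replace_single_sp '!', replace_single_sp '?', replace_single_del,
      replace_single_sp '>', replace_single_sp '$', replace_single_sp '-',
      replace_single_sp ';', replace_single_sp ':', replace_single_sp '/',
      replace_single_sp '#']
  -- commute the '\r' map out through the "/n" replace
  rw [replace_two_comm '/' 'n' '\r' (by decide) (by decide) (by decide) (by decide) (by decide)]
  -- commute the "'s" replace in through the '.', ',', '(', ')', '\r' maps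
  rw [replace_two_comm '\'' 's' ')' (by decide) (by decide) (by decide) (by decide) (by decide),
      replace_two_comm '\'' 's' '(' (by decide) (by decide) (by decide) (by decide) (by decide),
      replace_two_comm '\'' 's' ',' (by decide) (by decide) (by decide) (by decide) (by decide),
      replace_two_comm '\'' 's' '.' (by decide) (by decide) (by decide) (by decide) (by decide),
      replace_two_comm '\'' 's' '\r' (by decide) (by decide) (by decide) (by decide) (by decide)]
  rw [replace_two '\'' 's', replace_two '/' 'n']
  rw [show pvM '#' (pvM '/' (pvM ':' (pvM ';' (pvM '-' (pvM '$' (pvM '>' (pvD (pvM '?' (pvM '!'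
        (pvM '"' (pvM ')' (pvM '(' (pvM ',' (pvM '.' (pvM '\r'
          (pvRep2 '\'' 's' (pvRep2 '/' 'n' t))))))))))))))))) =
      pvChain (pvRep2 '\'' 's' (pvRep2 '/' 'n' t)) from rfl]
  rw [pvChain_eq_filterMap]
  exact (fusion t.length t (le_refl _)).symm

theorem foldl_append_singleton {α β : Type} (g : α → β) (l : List α) :
    ∀ acc : List β, l.foldl (fun acc item => acc ++ [g item]) acc = acc ++ l.map g := by
  induction l with
  | nil => intro acc; simp
  | cons a t ih => intro acc; simp [List.foldl_cons, ih]

-- ===== VERDICT (by name: the statement is the Claim_ definition above) =====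
theorem remove_specials_characters_spec : Claim_equal_remove_specials_characters := by
  intro documents _
  unfold Spec_remove_specials_characters remove_specials_characters remove_specials_characters_alt
  rw [foldl_append_singleton]
  simp only [List.nil_append]
  exact List.map_congr_left (fun item _ => item_eq item)
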